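-- pv_equiv track=rewrite | github.com/Zoey-Case/JPN520-NLP-Project | Source/GlobalMethods.py | FindOccurrences
-- ===== SOURCE A (Python) =====
-- def FindOccurrences(text):
--     list = []
--
--     for word in text:
--         location = 0
--         wordAdd = True
--         firstTerm = str(word[0])
--
--         for term in list:
--             secondTerm = str(term[0])
--
--             if(firstTerm == secondTerm):
--                 list[location][3] += 1
--                 wordAdd = False
--                 break
--             else:
--                 location += 1
--
--         if wordAdd:
--             list.append(word+[1])
--
--     return list
-- ===== SOURCE B (Python) =====
-- def FindOccurrences(text):
--     counts = {}
--     for word in text: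
--         key = str(word[0])
--         counts[key] = counts.get(key, 0) + 1
--
--     result = []
--     seen = set()
--     for word in text:
--         key = str(word[0])
--         if key not in seen:
--             seen.add(key)
--             entry = word + [1]
--             c = counts[key]
--             if c > 1:
--                 entry[3] += c - 1
--             result.append(entry)
--     return result
-- ===== Notes on version B (the rewrite author's own statement) =====
-- stated objective: alternative
-- what changed: Replaces the rescans of the growing result list (the result list is searched anew for every word) by two passes: a first pass builds a frequency table counts[str(word[0])], and a second pass emits, for each first occurrence of a key, word+[1] with entry[3] bumped once by counts[key]-1 when the key repeats; it trades the incremental in-place counting for a precomputed table.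
import Mathlib
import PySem

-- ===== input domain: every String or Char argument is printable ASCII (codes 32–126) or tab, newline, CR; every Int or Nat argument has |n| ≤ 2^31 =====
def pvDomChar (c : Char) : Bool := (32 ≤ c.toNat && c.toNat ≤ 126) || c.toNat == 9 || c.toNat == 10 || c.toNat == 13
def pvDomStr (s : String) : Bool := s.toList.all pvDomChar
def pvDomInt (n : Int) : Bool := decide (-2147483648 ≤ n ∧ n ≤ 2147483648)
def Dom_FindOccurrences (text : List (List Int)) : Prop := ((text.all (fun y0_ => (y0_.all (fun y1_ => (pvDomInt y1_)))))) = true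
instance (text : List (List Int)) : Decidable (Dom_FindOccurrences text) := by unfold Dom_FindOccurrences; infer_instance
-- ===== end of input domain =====

-- B replaces A's rescans of the growing result list by a different two-pass algorithm:
-- a key-frequency dict built first, then one emit pass over first occurrences.


-- ===== PORT A =====
-- str(word[0]); word[0] raises IndexError on an empty word — excluded by Pre_, the
-- .getD 0 fallback is never reached inside Pre_.
def pvKey (w : List Int) : String := PySem.Int.toStr ((PySem.List.pyGet? w 0).getD 0)

-- A's inner 'for term in list' with the location counter and break:
-- on the first entry whose str(term[0]) matches, do list[location][3] += 1 (some);
-- none = no match, i.e. wordAdd stays True.  term[3] += 1 raises IndexError when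
-- len(term) < 4 — excluded by Pre_; pySetD/pyGetD are exact in range.
def pvInnerA (firstTerm : String) : List (List Int) → Option (List (List Int))
  | [] => none
  | term :: rest =>
    if firstTerm = pvKey term then
      some (PySem.List.pySetD term 3 (PySem.List.pyGetD term 3 0 + 1) :: rest)
    else
      match pvInnerA firstTerm rest with
      | some rest' => some (term :: rest')
      | none => none

def FindOccurrences (text : List (List Int)) : List (List Int) :=
  text.foldl (fun lst word =>
    match pvInnerA (pvKey word) lst with
    | some lst' => lst'
    | none => lst ++ [word ++ [1]]) []

-- ===== PORT B =====
-- second pass of Source B: emit word+[1] at each first occurrence, bumping entry[3]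
-- once by counts[key]-1 when the key repeats
def pvEmitB (counts : PySem.Dict String Int) (text : List (List Int)) : List (List Int) :=
  (text.foldl (fun (st : List (List Int) × PySem.Set String) word =>
    let key := pvKey word
    if PySem.Set.contains st.2 key then st
    else
      let entry := word ++ [1]
      let c := counts.getD key 0
      let entry := if 1 < c then PySem.List.pySetD entry 3 (PySem.List.pyGetD entry 3 0 + (c - 1)) else entry
      (st.1 ++ [entry], PySem.Set.add st.2 key)) ([], PySem.Set.empty)).1

def FindOccurrences_alt (text : List (List Int)) : List (List Int) :=
  let counts := text.foldl (fun d word => d.insert (pvKey word) (d.getD (pvKey word) 0 + 1))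
    PySem.Dict.empty
  pvEmitB counts text

-- ===== PRECONDITION & SPEC =====
-- Pre_ excludes exactly the inputs on which A raises: an empty word (word[0] is an
-- IndexError), or a key occurring twice whose first-occurrence word is shorter than 3
-- (then list[location][3] += 1 is an IndexError).  B raises on those inputs too.
def Pre_FindOccurrences (text : List (List Int)) : Prop :=
  (∀ w ∈ text, w ≠ []) ∧
  ∀ i, (h : i < text.length) →
    ((text.drop (i+1)).any (fun w => w.head? == text[i].head?)) = true →
    ((text.take i).all (fun w => w.head? != text[i].head?)) = true →
    3 ≤ text[i].length
instance (text : List (List Int)) : Decidable (Pre_FindOccurrences text) := by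
  unfold Pre_FindOccurrences; infer_instance

def pvWitness_FindOccurrences : List (List Int) := [[1, 2, 3], [1, 9, 9], [2]]

def Spec_FindOccurrences (text : List (List Int)) (out : List (List Int)) : Prop := out = FindOccurrences_alt text
instance (text : List (List Int)) (out : List (List Int)) : Decidable (Spec_FindOccurrences text out) := by unfold Spec_FindOccurrences; infer_instance

-- ===== CLAIM (what is proved, stated in full; the proofs are below) =====
def Claim_equal_FindOccurrences : Prop := ∀ (text : List (List Int)), Dom_FindOccurrences text → Pre_FindOccurrences text → Spec_FindOccurrences text (FindOccurrences text)

-- ===== LEMMAS AND PROOFS =====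

-- 'entry[3] += n' as one operation (n = 0: untouched)
def pvBump (e : List Int) (n : Nat) : List Int :=
  if n = 0 then e else e.set 3 (e.getD 3 0 + (n : Int))

-- number of words in l whose key is k
def pvCnt (k : String) (l : List (List Int)) : Nat := l.countP (fun w => pvKey w = k)

-- the common normal form of both programs: first occurrences in order, each entry
-- bumped by (occurrences - 1)
def pvEmit : List (List Int) → List String → List (List Int)
  | [], _ => []
  | w :: r, s =>
    if pvKey w ∈ s then pvEmit r s
    else pvBump (w ++ [1]) (pvCnt (pvKey w) r) :: pvEmit r (s ++ [pvKey w])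

-- the index-0 / index-3 accesses as plain List operations
theorem pvGetD3 (e : List Int) : PySem.List.pyGetD e 3 0 = e.getD 3 0 := by
  simp [PySem.List.pyGetD, PySem.List.pyGet?, PySem.List.pyIdx?]
  split <;> simp_all

theorem pvSetD3 (e : List Int) (v : Int) : PySem.List.pySetD e 3 v = e.set 3 v := by
  have := PySem.List.pySetD_of_nonneg (xs := e) (i := 3) (v := v) (by omega)
  simpa using this

theorem pvKey_append_one (w : List Int) (hw : w ≠ []) : pvKey (w ++ [1]) = pvKey w := by
  unfold pvKey
  rw [PySem.List.pyGet?_zero, PySem.List.pyGet?_zero,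
    List.getElem?_append_left (by cases w <;> simp_all)]

theorem pvKey_bump (e : List Int) (n : Nat) : pvKey (pvBump e n) = pvKey e := by
  unfold pvBump
  split
  · rfl
  · unfold pvKey
    rw [PySem.List.pyGet?_zero, PySem.List.pyGet?_zero, List.getElem?_set_ne (by omega)]

theorem pvBump_one (e : List Int) :
    PySem.List.pySetD e 3 (PySem.List.pyGetD e 3 0 + 1) = pvBump e 1 := by
  rw [pvSetD3, pvGetD3]
  simp [pvBump]

theorem pvBump_bump (e : List Int) (n : Nat) : pvBump (pvBump e 1) n = pvBump e (n + 1) := by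
  rcases Nat.eq_zero_or_pos n with h | h
  · subst h; simp [pvBump]
  by_cases hl : 3 < e.length
  · have hg : (e.set 3 (e.getD 3 0 + (1 : Int))).getD 3 0 = e.getD 3 0 + 1 := by
      simp [List.getD, hl]
    simp only [pvBump, Nat.cast_one, if_neg (Nat.pos_iff_ne_zero.mp h),
      if_neg (by omega : ¬(1 : Nat) = 0), if_neg (by omega : ¬n + 1 = 0)]
    rw [hg, List.set_set]
    congr 1
    push_cast; ring
  · have h1 : ∀ v : Int, e.set 3 v = e := fun v => List.set_eq_of_length_le (by omega)
    simp [pvBump, h1]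

theorem pvInnerA_none (k : String) (acc : List (List Int)) :
    pvInnerA k acc = none ↔ k ∉ acc.map pvKey := by
  induction acc with
  | nil => simp [pvInnerA]
  | cons t r ih =>
    simp only [pvInnerA, List.map_cons, List.mem_cons]
    by_cases hk : k = pvKey t
    · simp [hk]
    · simp only [if_neg hk]
      cases hr : pvInnerA k r <;> simp_all

theorem pvInnerA_some (k : String) (acc : List (List Int))
    (hnd : (acc.map pvKey).Nodup) (hk : k ∈ acc.map pvKey) :
    pvInnerA k acc = some (acc.map fun e => if pvKey e = k then pvBump e 1 else e) := by
  induction acc with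
  | nil => simp at hk
  | cons t r ih =>
    simp only [List.map_cons, List.nodup_cons] at hnd
    simp only [List.map_cons, List.mem_cons] at hk
    by_cases ht : k = pvKey t
    · have hnr : k ∉ r.map pvKey := by rw [ht]; exact hnd.1
      have hmap : (r.map fun e => if pvKey e = k then pvBump e 1 else e) = r := by
        have hpt : ∀ e ∈ r, (if pvKey e = k then pvBump e 1 else e) = e := by
          intro e he
          apply if_neg
          intro hh
          exact hnr (by rw [← hh]; exact List.mem_map_of_mem he)
        rw [List.map_congr_left hpt]
        simp
      simp only [pvInnerA, if_pos ht, List.map_cons, if_pos ht.symm, hmap, pvBump_one]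
    · have hkr : k ∈ r.map pvKey := hk.resolve_left ht
      simp only [pvInnerA, if_neg ht, ih hnd.2 hkr, List.map_cons,
        if_neg (fun h : pvKey t = k => ht h.symm)]

set_option maxHeartbeats 1000000 in
theorem pvFoldA (rest : List (List Int)) : ∀ acc : List (List Int),
    (∀ w ∈ rest, w ≠ []) → (acc.map pvKey).Nodup →
    rest.foldl (fun lst word =>
        match pvInnerA (pvKey word) lst with
        | some lst' => lst'
        | none => lst ++ [word ++ [1]]) acc
      = acc.map (fun e => pvBump e (pvCnt (pvKey e) rest)) ++ pvEmit rest (acc.map pvKey) := by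
  induction rest with
  | nil =>
    intro acc _ _
    simp [pvEmit, pvCnt, pvBump]
  | cons w rest ih =>
    intro acc hne hnd
    rw [List.foldl_cons]
    by_cases hw : pvKey w ∈ acc.map pvKey
    · have hstep : (match pvInnerA (pvKey w) acc with
          | some lst' => lst'
          | none => acc ++ [w ++ [1]])
          = acc.map fun e => if pvKey e = pvKey w then pvBump e 1 else e := by
        rw [pvInnerA_some _ _ hnd hw]
      rw [hstep]
      have hkeys : ((acc.map fun e => if pvKey e = pvKey w then pvBump e 1 else e).map pvKey)
          = acc.map pvKey := by
        rw [List.map_map]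
        apply List.map_congr_left
        intro e _
        by_cases h : pvKey e = pvKey w <;> simp [Function.comp, h, pvKey_bump]
      have hnd' : (((acc.map fun e => if pvKey e = pvKey w then pvBump e 1 else e).map pvKey)).Nodup := by
        rw [hkeys]; exact hnd
      have hih := ih (acc.map fun e => if pvKey e = pvKey w then pvBump e 1 else e)
        (fun x hx => hne x (List.mem_cons_of_mem _ hx)) hnd'
      rw [hih, hkeys]
      have hemit : pvEmit (w :: rest) (acc.map pvKey) = pvEmit rest (acc.map pvKey) := by
        simp [pvEmit, hw]
      have hmap : ((acc.map fun e => if pvKey e = pvKey w then pvBump e 1 else e).map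
            fun e => pvBump e (pvCnt (pvKey e) rest))
          = acc.map fun e => pvBump e (pvCnt (pvKey e) (w :: rest)) := by
        rw [List.map_map]
        apply List.map_congr_left
        intro e _
        simp only [Function.comp_apply]
        by_cases h : pvKey e = pvKey w
        · have hcnt : pvCnt (pvKey e) (w :: rest) = pvCnt (pvKey e) rest + 1 := by
            simp [pvCnt, h.symm]
          rw [if_pos h, pvKey_bump, pvBump_bump, hcnt]
        · have hcnt : pvCnt (pvKey e) (w :: rest) = pvCnt (pvKey e) rest := by
            simp [pvCnt, List.countP_cons]
            exact fun hh => h hh.symm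
          rw [if_neg h, hcnt]
      rw [hemit, hmap]
    · have hstep : (match pvInnerA (pvKey w) acc with
          | some lst' => lst'
          | none => acc ++ [w ++ [1]]) = acc ++ [w ++ [1]] := by
        rw [(pvInnerA_none _ _).mpr hw]
      rw [hstep]
      have hw1 : w ≠ [] := hne w List.mem_cons_self
      have hkeys : ((acc ++ [w ++ [1]]).map pvKey) = acc.map pvKey ++ [pvKey w] := by
        simp [pvKey_append_one w hw1]
      have hnd' : (((acc ++ [w ++ [1]]).map pvKey)).Nodup := by
        rw [hkeys]
        simp [List.nodup_append, hnd]
        exact fun a ha hh => hw (by rw [← hh]; exact List.mem_map_of_mem ha)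
      have hih := ih (acc ++ [w ++ [1]]) (fun x hx => hne x (List.mem_cons_of_mem _ hx)) hnd'
      rw [hih, hkeys]
      have hemit : pvEmit (w :: rest) (acc.map pvKey)
          = pvBump (w ++ [1]) (pvCnt (pvKey w) rest) :: pvEmit rest (acc.map pvKey ++ [pvKey w]) := by
        simp [pvEmit, hw]
      have hmap : (acc.map fun e => pvBump e (pvCnt (pvKey e) rest))
          = acc.map fun e => pvBump e (pvCnt (pvKey e) (w :: rest)) := by
        apply List.map_congr_left
        intro e he
        have h : pvKey e ≠ pvKey w := fun hh => hw (by rw [← hh]; exact List.mem_map_of_mem he)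
        have hcnt : pvCnt (pvKey e) (w :: rest) = pvCnt (pvKey e) rest := by
          simp [pvCnt, List.countP_cons]
          exact fun hh => h hh.symm
        rw [hcnt]
      rw [hemit, List.map_append, List.map_cons, List.map_nil, pvKey_append_one w hw1,
        List.append_assoc, List.singleton_append, hmap]

theorem pvCountsD (l : List (List Int)) : ∀ (d : PySem.Dict String Int) (k : String),
    (l.foldl (fun d word => d.insert (pvKey word) (d.getD (pvKey word) 0 + 1)) d).getD k 0
      = d.getD k 0 + (pvCnt k l : Int) := by
  induction l with
  | nil => intro d k; simp [pvCnt]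
  | cons w r ih =>
    intro d k
    rw [List.foldl_cons, ih]
    rw [PySem.Dict.getD_insert]
    by_cases h : k = pvKey w
    · rw [if_pos h, h]
      have hcnt : pvCnt (pvKey w) (w :: r) = pvCnt (pvKey w) r + 1 := by
        simp [pvCnt]
      rw [hcnt]
      push_cast; ring
    · rw [if_neg h]
      have hcnt : pvCnt k (w :: r) = pvCnt k r := by
        simp [pvCnt, List.countP_cons]
        exact fun hh => h hh.symm
      rw [hcnt]

set_option maxHeartbeats 1000000 in
theorem pvFoldB (counts : PySem.Dict String Int) (s : List (List Int)) :
    ∀ (seen : List String) (res : List (List Int)),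
    (∀ w ∈ s, pvKey w ∉ seen → counts.getD (pvKey w) 0 = (pvCnt (pvKey w) s : Int)) →
    (s.foldl (fun (st : List (List Int) × PySem.Set String) word =>
      let key := pvKey word
      if PySem.Set.contains st.2 key then st
      else
        let entry := word ++ [1]
        let c := counts.getD key 0
        let entry := if 1 < c then PySem.List.pySetD entry 3 (PySem.List.pyGetD entry 3 0 + (c - 1)) else entry
        (st.1 ++ [entry], PySem.Set.add st.2 key)) (res, seen)).1
    = res ++ pvEmit s seen := by
  induction s with
  | nil => intro seen res _; simp [pvEmit]
  | cons w r ih =>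
    intro seen res H
    rw [List.foldl_cons]
    by_cases hw : pvKey w ∈ seen
    · have hc : PySem.Set.contains seen (pvKey w) = true := by
        simp [hw]
      simp only [hc, if_pos]
      have hih := ih seen res (by
        intro w' hw' hns
        have hne : pvKey w ≠ pvKey w' := fun hh => hns (by rw [← hh]; exact hw)
        rw [H w' (List.mem_cons_of_mem _ hw') hns]
        have hcnt : pvCnt (pvKey w') (w :: r) = pvCnt (pvKey w') r := by
          simp [pvCnt, List.countP_cons]
          exact fun hh => hne hh
        rw [hcnt])
      rw [hih]
      have hemit : pvEmit (w :: r) seen = pvEmit r seen := by simp [pvEmit, hw]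
      rw [hemit]
    · have hc : PySem.Set.contains seen (pvKey w) = false := by
        simp [hw]
      simp only [hc, Bool.false_eq_true, if_false]
      have hcount : counts.getD (pvKey w) 0 = ((pvCnt (pvKey w) r : Nat) : Int) + 1 := by
        rw [H w List.mem_cons_self hw]
        simp [pvCnt]
      have hentry :
          (if 1 < counts.getD (pvKey w) 0 then
              PySem.List.pySetD (w ++ [1]) 3
                (PySem.List.pyGetD (w ++ [1]) 3 0 + (counts.getD (pvKey w) 0 - 1))
            else w ++ [1]) = pvBump (w ++ [1]) (pvCnt (pvKey w) r) := by
        rcases Nat.eq_zero_or_pos (pvCnt (pvKey w) r) with h0 | h0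
        · rw [hcount, h0]
          simp [pvBump]
        · rw [hcount, if_pos (by omega)]
          rw [pvSetD3, pvGetD3]
          simp only [pvBump, if_neg (Nat.pos_iff_ne_zero.mp h0)]
          congr 1
          ring
      have hadd : PySem.Set.add seen (pvKey w) = seen ++ [pvKey w] := by
        simp [PySem.Set.add, hw]
      rw [hentry, hadd]
      have hih := ih (seen ++ [pvKey w]) (res ++ [pvBump (w ++ [1]) (pvCnt (pvKey w) r)]) (by
        intro w' hw' hns
        simp only [List.mem_append, List.mem_singleton, not_or] at hns
        rw [H w' (List.mem_cons_of_mem _ hw') hns.1]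
        have hcnt : pvCnt (pvKey w') (w :: r) = pvCnt (pvKey w') r := by
          simp [pvCnt, List.countP_cons]
          exact fun hh => hns.2 hh.symm
        rw [hcnt])
      rw [hih]
      rw [List.append_assoc, List.singleton_append]
      have hemit : pvEmit (w :: r) seen
          = pvBump (w ++ [1]) (pvCnt (pvKey w) r) :: pvEmit r (seen ++ [pvKey w]) := by
        simp [pvEmit, hw]
      rw [hemit]

-- ===== VERDICT (by name: the statement is the Claim_ definition above) =====
theorem FindOccurrences_spec : Claim_equal_FindOccurrences := by
  intro text _ hpre
  unfold Spec_FindOccurrences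
  have hA : FindOccurrences text = pvEmit text [] := by
    unfold FindOccurrences
    rw [pvFoldA text [] hpre.1 (by simp)]
    simp
  have hcounts : ∀ w ∈ text, pvKey w ∉ (PySem.Set.empty : PySem.Set String) →
      (text.foldl (fun d word => d.insert (pvKey word) (d.getD (pvKey word) 0 + 1))
        PySem.Dict.empty).getD (pvKey w) 0 = (pvCnt (pvKey w) text : Int) := by
    intro w _ _
    rw [pvCountsD]
    simp
  have hB : FindOccurrences_alt text = pvEmit text [] := by
    unfold FindOccurrences_alt pvEmitB
    rw [pvFoldB _ text PySem.Set.empty [] hcounts]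
    simp [PySem.Set.empty]
  rw [hA, hB]
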